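-- pv_equiv track=rewrite | github.com/daniel-reich/ubiquitous-fiesta | s89T6kpDGf8Pc6mzf_16.py | seven_segment
-- ===== SOURCE A (Python) =====
-- def seven_segment(txt):
--   guide = {'0':'abcdef','1':'bc','2':'abdeg','3':'abcdg','4':'bcfg','5':'acdfg',
--   '6':'acdefg','7':'abc','8':'abcdefg','9':'abcfg'}
--   changes, temp = [], []
--   for i in range(1,len(txt)):
--     for j in 'abcdefg':
--       if j in guide[txt[i]] and j not in guide[txt[i-1]]:
--         temp.append(j.upper())
--       elif j in guide[txt[i-1]] and j not in guide[txt[i]]: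
--         temp.append(j)
--     changes.append(temp)
--     temp = []
--   return changes
-- ===== SOURCE B (Python) =====
-- def seven_segment(txt):
--   # bit k (k=0..6) of a mask stands for segment chr(97+k); masks precomputed from
--   # the seven-segment table ('a'->1, 'b'->2, ..., 'g'->64)
--   masks = {'0':63,'1':6,'2':91,'3':79,'4':102,'5':109,'6':125,'7':7,'8':127,'9':103}
--   changes = []
--   for p, c in zip(txt, txt[1:]):
--     mc = masks[c]
--     d = masks[p] ^ mc  # bits of the segments that toggle
--     row = []
--     k = 0
--     while d:
--       if d & 1:
--         ch = chr(97 + k)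
--         row.append(ch.upper() if (mc >> k) & 1 else ch)
--       d >>= 1
--       k += 1
--     changes.append(row)
--   return changes
-- ===== Notes on version B (the rewrite author's own statement) =====
-- stated objective: alternative
-- what changed: B replaces A's per-pair scan of all seven segment letters with string membership tests by a 7-bit bitmask per digit: the XOR of the two masks gives the toggled segments, and a while-loop over the bits of the XOR emits chr(97+k) (uppercased when the bit is set in the current digit's mask), skipping unchanged segments entirely.
import Mathlib
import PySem

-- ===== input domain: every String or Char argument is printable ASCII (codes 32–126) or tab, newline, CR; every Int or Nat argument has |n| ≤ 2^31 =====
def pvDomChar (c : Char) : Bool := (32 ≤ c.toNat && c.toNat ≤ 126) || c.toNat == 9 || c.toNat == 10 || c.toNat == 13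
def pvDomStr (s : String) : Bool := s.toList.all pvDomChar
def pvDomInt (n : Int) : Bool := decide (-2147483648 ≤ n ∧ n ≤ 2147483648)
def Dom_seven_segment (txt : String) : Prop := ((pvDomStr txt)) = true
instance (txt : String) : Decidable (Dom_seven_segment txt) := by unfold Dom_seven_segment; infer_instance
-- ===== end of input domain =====

-- B replaces A's per-pair scan of all seven segment letters with per-digit 7-bit masks:
-- the XOR of the masks gives the toggled segments and a while-loop over its bits emits them;
-- alternative data structure (bit arithmetic instead of string membership), same cost.

-- ===== PORT A =====
-- A's segment dict (its string values written as their character lists;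
-- the membership test 'j in <segments>' is then char membership)
def pvGuideA : List (Char × List Char) :=
  [('0', ['a','b','c','d','e','f']), ('1', ['b','c']), ('2', ['a','b','d','e','g']),
   ('3', ['a','b','c','d','g']), ('4', ['b','c','f','g']), ('5', ['a','c','d','f','g']),
   ('6', ['a','c','d','e','f','g']), ('7', ['a','b','c']), ('8', ['a','b','c','d','e','f','g']),
   ('9', ['a','b','c','f','g'])]

-- the inner "for j in 'abcdefg'" loop of A; the dict lookup defaults to [] where Python
-- would raise KeyError (those inputs are outside Pre_seven_segment)
def pvSegA (prev cur : Char) : List String :=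
  let gCur := (pvGuideA.lookup cur).getD []
  let gPrev := (pvGuideA.lookup prev).getD []
  ['a','b','c','d','e','f','g'].foldl (fun temp j =>
    if j ∈ gCur ∧ j ∉ gPrev then temp ++ [String.ofList [PySem.Chars.upperChar j]]
    else if j ∈ gPrev ∧ j ∉ gCur then temp ++ [String.ofList [j]]
    else temp) []

def seven_segment (txt : String) : List (List String) :=
  let cs := txt.toList
  (PySem.List.pyRange 1 (cs.length : Int) 1).foldl
    (fun changes i =>
      changes ++ [pvSegA (PySem.List.pyGetD cs (i - 1) ' ') (PySem.List.pyGetD cs i ' ')]) []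

-- ===== PORT B =====
-- the dict literal 'masks' of Source B (bit k of a mask = segment chr(97+k))
def pvMasks : List (Char × Nat) :=
  [('0', 63), ('1', 6), ('2', 91), ('3', 79), ('4', 102), ('5', 109),
   ('6', 125), ('7', 7), ('8', 127), ('9', 103)]

-- Source B's 'while d:' loop; fuel 7 only makes the recursion total (d < 128, so at most
-- 7 halvings reach 0 — the guard 'if d = 0' is Python's loop condition)
def pvBits : Nat → Nat → Nat → Nat → List String
  | 0, _, _, _ => []
  | fuel + 1, d, mc, k =>
    if d = 0 then []
    else
      (if d % 2 = 1 then
        [if (mc >>> k) % 2 = 1 then String.ofList [PySem.Chars.upperChar (Char.ofNat (97 + k))]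
         else String.ofList [Char.ofNat (97 + k)]]
       else []) ++ pvBits fuel (d / 2) mc (k + 1)

-- one pair of Source B: XOR of the two masks, then the bit loop
def pvSegB (prev cur : Char) : List String :=
  let mc := (pvMasks.lookup cur).getD 0
  let d := ((pvMasks.lookup prev).getD 0) ^^^ mc
  pvBits 7 d mc 0

def seven_segment_alt (txt : String) : List (List String) :=
  (txt.toList.zip (PySem.List.slice txt.toList (some 1) none)).map (fun pc => pvSegB pc.1 pc.2)

-- ===== PRECONDITION & SPEC =====
-- Pre_ excludes exactly the strings of length ≥ 2 containing a non-digit character, on which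
-- A raises KeyError on the segment-dict lookup (on strings of length ≤ 1 A returns [] regardless).
def Pre_seven_segment (txt : String) : Prop :=
  txt.toList.length ≤ 1 ∨ (txt.toList.all fun c => 48 ≤ c.toNat && c.toNat ≤ 57) = true
instance (txt : String) : Decidable (Pre_seven_segment txt) := by unfold Pre_seven_segment; infer_instance

def pvWitness_seven_segment : String := "172"

def Spec_seven_segment (txt : String) (out : List (List String)) : Prop := out = seven_segment_alt txt
instance (txt : String) (out : List (List String)) : Decidable (Spec_seven_segment txt out) := by unfold Spec_seven_segment; infer_instance

-- ===== CLAIM (what is proved, stated in full; the proofs are below) =====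
def Claim_equal_seven_segment : Prop := ∀ (txt : String), Dom_seven_segment txt → Pre_seven_segment txt → Spec_seven_segment txt (seven_segment txt)

-- ===== LEMMAS AND PROOFS =====

-- a character with code in [48,57] is one of the ten digit characters
theorem pvCharDigit (c : Char) (h1 : 48 ≤ c.toNat) (h2 : c.toNat ≤ 57) :
    c ∈ ['0','1','2','3','4','5','6','7','8','9'] := by
  have key : ∀ d : Char, c.toNat = d.toNat → c = d := fun d h => Char.ext (UInt32.toNat_inj.mp h)
  have h : c.toNat = 48 ∨ c.toNat = 49 ∨ c.toNat = 50 ∨ c.toNat = 51 ∨ c.toNat = 52 ∨ c.toNat = 53 ∨ c.toNat = 54 ∨ c.toNat = 55 ∨ c.toNat = 56 ∨ c.toNat = 57 := by omega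
  rcases h with h|h|h|h|h|h|h|h|h|h
  · rw [key '0' (by rw [h]; decide)]; decide
  · rw [key '1' (by rw [h]; decide)]; decide
  · rw [key '2' (by rw [h]; decide)]; decide
  · rw [key '3' (by rw [h]; decide)]; decide
  · rw [key '4' (by rw [h]; decide)]; decide
  · rw [key '5' (by rw [h]; decide)]; decide
  · rw [key '6' (by rw [h]; decide)]; decide
  · rw [key '7' (by rw [h]; decide)]; decide
  · rw [key '8' (by rw [h]; decide)]; decide
  · rw [key '9' (by rw [h]; decide)]; decide

-- the 100 digit pairs, checked by kernel evaluation of a Bool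
theorem pvSegAll : (['0','1','2','3','4','5','6','7','8','9'].all fun p =>
    ['0','1','2','3','4','5','6','7','8','9'].all fun c =>
      pvSegA p c == pvSegB p c) = true := by decide

theorem pvSeg_eq : ∀ p ∈ ['0','1','2','3','4','5','6','7','8','9'],
    ∀ c ∈ ['0','1','2','3','4','5','6','7','8','9'], pvSegA p c = pvSegB p c := by
  intro p hp c hc
  have h := pvSegAll
  rw [List.all_eq_true] at h
  have h2 := h p hp
  rw [List.all_eq_true] at h2
  exact eq_of_beq (h2 c hc)

theorem seven_segment_eq_map (txt : String) :
    seven_segment txt = (List.range (((txt.toList.length : Int) - 1).toNat)).map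
      (fun (k : Nat) => pvSegA (PySem.List.pyGetD txt.toList (1 + (k : Int) - 1) ' ')
                        (PySem.List.pyGetD txt.toList (1 + (k : Int)) ' ')) := by
  unfold seven_segment
  rw [PySem.List.foldl_append_singleton_eq_map, PySem.List.pyRange_one, List.map_map,
      List.nil_append]
  rfl

-- ===== VERDICT (by name: the statement is the Claim_ definition above) =====
theorem seven_segment_spec : Claim_equal_seven_segment := by
  intro txt _ hpre
  unfold Spec_seven_segment seven_segment_alt
  have hsl : PySem.List.slice txt.toList (some 1) none = txt.toList.drop 1 := by
    rw [PySem.List.slice_from] <;> norm_num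
  rw [seven_segment_eq_map, hsl]
  apply List.ext_getElem
  · simp only [List.length_map, List.length_range, List.length_zip, List.length_drop]
    omega
  · intro k hk1 hk2
    simp only [List.length_map, List.length_range] at hk1
    have hlen : k + 1 < txt.toList.length := by omega
    have hdig : ∀ c ∈ txt.toList, c ∈ ['0','1','2','3','4','5','6','7','8','9'] := by
      rcases hpre with h | h
      · omega
      · intro c hc
        have hb := (List.all_eq_true.mp h) c hc
        simp only [Bool.and_eq_true, decide_eq_true_eq] at hb
        exact pvCharDigit c hb.1 hb.2
    simp only [List.getElem_map, List.getElem_range, List.getElem_zip]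
    rw [show (1 + (k : Int)) - 1 = (k : Int) by ring,
        PySem.List.pyGetD_eq_getElem txt.toList ' ' (by omega) (by omega),
        PySem.List.pyGetD_eq_getElem txt.toList ' ' (by omega) (by omega)]
    simp only [Int.toNat_natCast, List.getElem_drop]
    simp only [show (1 + (k : Int)).toNat = k + 1 by omega, show 1 + k = k + 1 by omega]
    exact pvSeg_eq _ (hdig _ (List.getElem_mem _)) _ (hdig _ (List.getElem_mem _))
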